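-- pv_equiv track=rewrite | github.com/UPCnet/maxbunny | maxbunny/consumers/tweety.py | get_followed_users_by_name
-- ===== SOURCE A (Python) =====
-- def get_followed_users_by_name(contexts):
--     followed_users = {}
--
--     for maxserver in contexts.keys():
--         for context in contexts[maxserver]:
--             followed_users.setdefault(context.get('twitterUsername'), [])
--
--             # In the case that the user key already contains a maxserver
--             # add it only if it's not the same maxserver ...
--             if maxserver not in followed_users[context.get('twitterUsername')]:
--                 followed_users[context.get('twitterUsername')].append(maxserver)
--     return followed_users
-- ===== SOURCE B (Python) =====
-- def get_followed_users_by_name(contexts):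
--     # pass 1: flatten to (username, maxserver) pairs in traversal order
--     pairs = [(context.get('twitterUsername'), maxserver)
--              for maxserver, maxcontexts in contexts.items()
--              for context in maxcontexts]
--     # pass 2: group all candidate maxservers per username, duplicates kept
--     raw = {}
--     for username, maxserver in pairs:
--         raw.setdefault(username, []).append(maxserver)
--     # pass 3: ordered dedup of each list (A's guarded append = dedup of the candidates)
--     return {username: list(dict.fromkeys(maxservers))
--             for username, maxservers in raw.items()}
-- ===== Notes on version B (the rewrite author's own statement) =====
-- stated objective: faster
-- what changed: B replaces A's nested loop with an inline membership-guarded append by a staged pipeline: flatten contexts to a flat (username, maxserver) pair list, group it into raw per-username lists with unconditional appends, then ordered-dedup each list once at the end (dict.fromkeys); correct because A's guarded append computes exactly the ordered dedup of the candidate sequence.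
-- outside the precondition, e.g. on get_followed_users_by_name({'m': [{}]}): A returns {None: ['m']}, B returns {None: ['m']}
import Mathlib
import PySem

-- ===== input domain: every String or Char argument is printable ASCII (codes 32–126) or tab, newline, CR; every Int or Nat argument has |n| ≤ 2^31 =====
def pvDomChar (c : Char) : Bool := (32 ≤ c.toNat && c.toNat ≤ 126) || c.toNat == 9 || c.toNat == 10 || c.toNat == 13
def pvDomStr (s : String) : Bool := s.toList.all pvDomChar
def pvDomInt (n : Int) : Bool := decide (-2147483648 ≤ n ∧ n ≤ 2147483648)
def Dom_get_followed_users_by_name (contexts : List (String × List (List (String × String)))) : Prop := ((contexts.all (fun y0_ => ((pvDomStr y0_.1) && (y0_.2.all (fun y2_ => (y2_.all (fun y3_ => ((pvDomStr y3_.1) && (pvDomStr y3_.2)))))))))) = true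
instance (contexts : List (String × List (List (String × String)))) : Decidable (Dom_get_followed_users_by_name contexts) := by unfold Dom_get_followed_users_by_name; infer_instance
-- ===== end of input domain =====

-- B restructures A's nested guarded-append loop as a staged pipeline: flatten to (username, maxserver)
-- pairs, group with unconditional appends, then ordered-dedup each list once at the end.


-- ===== PORT A =====
-- context.get('twitterUsername') (used by both Pythons; `none` = key missing, which Pre_ excludes)
def pyCtxUser (ctx : List (String × String)) : Option String :=
  (PySem.Dict.ofList ctx).get? "twitterUsername"

-- one iteration of A's inner loop; on a missing key Python keys the entry by None,
-- unrepresentable in the return type — Pre_ excludes that, here the context is skipped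
def aInner (maxserver : String) (fu : PySem.Dict String (List String))
    (ctx : List (String × String)) : PySem.Dict String (List String) :=
  match pyCtxUser ctx with
  | none => fu
  | some u =>
    let fu := fu.setdefault u ([] : List String)
    if maxserver ∈ fu.getD u [] then fu else fu.insert u (fu.getD u [] ++ [maxserver])

def get_followed_users_by_name (contexts : List (String × List (List (String × String)))) : List (String × List String) :=
  ((PySem.Dict.ofList contexts).items.foldl
      (fun fu p => p.2.foldl (aInner p.1) fu)
      PySem.Dict.empty).items

-- ===== PORT B =====
-- pass 1: the flat pair list  [(c.get('twitterUsername'), maxserver) …]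
def bPairs (contexts : List (String × List (List (String × String)))) :
    List (Option String × String) :=
  (PySem.Dict.ofList contexts).items.flatMap
    (fun p => p.2.map (fun c => (pyCtxUser c, p.1)))

-- pass 2 body: raw.setdefault(username, []).append(maxserver);
-- a missing key (None username) is outside Pre_ and skipped, as in port A
def bStep (raw : PySem.Dict String (List String)) (q : Option String × String) :
    PySem.Dict String (List String) :=
  match q.1 with
  | none => raw
  | some u => raw.modify u ([] : List String) (· ++ [q.2])

def get_followed_users_by_name_alt (contexts : List (String × List (List (String × String)))) : List (String × List String) :=
  let raw := (bPairs contexts).foldl bStep PySem.Dict.empty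
  -- pass 3: list(dict.fromkeys(maxservers)) = ordered dedup
  raw.items.map (fun p => (p.1, PySem.List.dedup p.2))

-- ===== PRECONDITION & SPEC =====
-- Pre_ excludes contexts lacking a 'twitterUsername' key: there Python's A (and B) key an entry
-- by None, which is not a value of the declared return type List (String × List String).
def Pre_get_followed_users_by_name (contexts : List (String × List (List (String × String)))) : Prop :=
  ∀ p ∈ contexts, ∀ ctx ∈ p.2, "twitterUsername" ∈ ctx.map Prod.fst
instance (contexts : List (String × List (List (String × String)))) : Decidable (Pre_get_followed_users_by_name contexts) := by unfold Pre_get_followed_users_by_name; infer_instance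

def pvWitness_get_followed_users_by_name : (List (String × List (List (String × String)))) :=
  [("m1", [[("twitterUsername", "alice")], [("twitterUsername", "bob")]]),
   ("m2", [[("twitterUsername", "alice")]])]

def Spec_get_followed_users_by_name (contexts : List (String × List (List (String × String)))) (out : List (String × List String)) : Prop := out = get_followed_users_by_name_alt contexts
instance (contexts : List (String × List (List (String × String)))) (out : List (String × List String)) : Decidable (Spec_get_followed_users_by_name contexts out) := by unfold Spec_get_followed_users_by_name; infer_instance

-- ===== CLAIM (what is proved, stated in full; the proofs are below) =====
def Claim_equal_get_followed_users_by_name : Prop := ∀ (contexts : List (String × List (List (String × String)))), Dom_get_followed_users_by_name contexts → Pre_get_followed_users_by_name contexts → Spec_get_followed_users_by_name contexts (get_followed_users_by_name contexts)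

-- ===== LEMMAS AND PROOFS =====

-- A's flat step on one (username, maxserver) pair: skip None, else guarded append
def aStep (fu : PySem.Dict String (List String)) (q : Option String × String) :
    PySem.Dict String (List String) :=
  match q.1 with
  | none => fu
  | some u => if q.2 ∈ fu.getD u [] then fu else fu.modify u ([] : List String) (· ++ [q.2])

-- A's inner-loop body, collapsed: setdefault + guarded append = guarded modify
lemma aInner_eq (ms : String) (fu : PySem.Dict String (List String)) (ctx : List (String × String)) :
    aInner ms fu ctx = aStep fu (pyCtxUser ctx, ms) := by
  unfold aInner aStep
  cases pyCtxUser ctx with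
  | none => rfl
  | some u =>
    simp only
    by_cases hc : fu.contains u = true
    · simp [PySem.Dict.setdefault, hc, PySem.Dict.modify]
    · have hc' : fu.contains u = false := by simpa using hc
      have hg : fu.getD u ([] : List String) = [] := PySem.Dict.getD_of_not_contains fu ([] : List String) hc'
      have h1 : fu.setdefault u ([] : List String) = fu.insert u [] := by
        simp [PySem.Dict.setdefault, PySem.Dict.insert, hc']
      simp [h1, hg, PySem.Dict.insert_insert_self, PySem.Dict.modify]

-- A's nested loops = one fold of aStep over the flat pair list
lemma aFlat : ∀ (items : List (String × List (List (String × String))))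
    (fu : PySem.Dict String (List String)),
    items.foldl (fun fu p => p.2.foldl (aInner p.1) fu) fu
      = (items.flatMap (fun p => p.2.map (fun c => (pyCtxUser c, p.1)))).foldl aStep fu := by
  intro items
  induction items with
  | nil => intro fu; rfl
  | cons p items ih =>
    intro fu
    simp only [List.foldl_cons, List.flatMap_cons, List.foldl_append]
    rw [ih]
    congr 1
    rw [List.foldl_map]
    have hfun : aInner p.1 = fun fu c => aStep fu (pyCtxUser c, p.1) := by
      funext fu c; exact aInner_eq p.1 fu c
    rw [hfun]

-- lookup after B's grouping fold: starting list ++ all candidates for that username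
lemma getD_foldB : ∀ (pairs : List (Option String × String))
    (d : PySem.Dict String (List String)) (u : String),
    (pairs.foldl bStep d).getD u []
      = d.getD u [] ++ (pairs.filter (fun q => q.1 == some u)).map (·.2) := by
  intro pairs
  induction pairs with
  | nil => intro d u; simp
  | cons q pairs ih =>
    intro d u
    cases hq : q.1 with
    | none => simp [List.foldl_cons, bStep, hq, ih]
    | some v =>
      simp only [List.foldl_cons, bStep, hq]
      rw [ih, PySem.Dict.getD_modify]
      by_cases huv : u = v
      · subst huv; simp [hq]
      · simp [hq, huv, Ne.symm huv]

-- lookup after A's flat fold: the guarded appends compute the ordered dedup of the candidates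
lemma getD_foldA : ∀ (pairs : List (Option String × String))
    (d : PySem.Dict String (List String)) (u : String),
    (pairs.foldl aStep d).getD u []
      = ((pairs.filter (fun q => q.1 == some u)).map (·.2)).foldl PySem.Set.add (d.getD u []) := by
  intro pairs
  induction pairs with
  | nil => intro d u; simp
  | cons q pairs ih =>
    intro d u
    cases hq : q.1 with
    | none => simp [List.foldl_cons, aStep, hq, ih]
    | some v =>
      simp only [List.foldl_cons, aStep, hq]
      by_cases huv : u = v
      · subst huv
        rw [ih]
        simp only [hq, List.filter_cons, beq_self_eq_true, if_pos, List.map_cons, List.foldl_cons]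
        congr 1
        rw [PySem.Set.add_eq_ite]
        by_cases hm : q.2 ∈ d.getD u []
        · simp [hm]
        · rw [if_neg hm, if_neg hm, PySem.Dict.getD_modify_self]
      · rw [ih]
        have hne : ¬ ((q.1 == some u) = true) := by simp [hq, Ne.symm huv]
        by_cases hm : q.2 ∈ d.getD v []
        · simp [hm, hq, Ne.symm huv]
        · rw [if_neg hm]
          simp [hq, Ne.symm huv, PySem.Dict.getD_modify, huv]

-- inserting/modifying at key v is Set.add v on the key list
lemma keys_insert_add (d : PySem.Dict String (List String)) (v : String) (x : List String) :
    (d.insert v x).keys = PySem.Set.add d.keys v := by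
  by_cases h : d.contains v = true
  · rw [PySem.Dict.keys_insert_of_contains d x h, PySem.Set.add_eq_ite,
      if_pos ((PySem.Dict.contains_iff_mem_keys d v).1 h)]
  · have h' : d.contains v = false := by simpa using h
    rw [PySem.Dict.keys_insert_of_not_contains d x h', PySem.Set.add_eq_ite, if_neg]
    intro hv
    exact h ((PySem.Dict.contains_iff_mem_keys d v).2 hv)

-- keys after either fold: the usernames appear in first-encounter order
lemma keys_foldB : ∀ (pairs : List (Option String × String))
    (d : PySem.Dict String (List String)),
    (pairs.foldl bStep d).keys = PySem.Set.update d.keys (pairs.filterMap (·.1)) := by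
  intro pairs
  induction pairs with
  | nil => intro d; simp [PySem.Set.update]
  | cons q pairs ih =>
    intro d
    cases hq : q.1 with
    | none => simp [List.foldl_cons, bStep, hq, ih]
    | some v =>
      simp only [List.foldl_cons, bStep, hq, List.filterMap_cons]
      rw [ih, PySem.Dict.keys_modify, keys_insert_add, PySem.Set.update_cons]

lemma keys_foldA : ∀ (pairs : List (Option String × String))
    (d : PySem.Dict String (List String)),
    (pairs.foldl aStep d).keys = PySem.Set.update d.keys (pairs.filterMap (·.1)) := by
  intro pairs
  induction pairs with
  | nil => intro d; simp [PySem.Set.update]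
  | cons q pairs ih =>
    intro d
    cases hq : q.1 with
    | none => simp [List.foldl_cons, aStep, hq, ih]
    | some v =>
      simp only [List.foldl_cons, aStep, hq]
      by_cases hm : q.2 ∈ d.getD v []
      · rw [if_pos hm, ih]
        have hv : v ∈ d.keys := by
          rw [← PySem.Dict.contains_iff_mem_keys]
          by_contra hc
          have : d.contains v = false := by simpa using hc
          rw [PySem.Dict.getD_of_not_contains d _ this] at hm
          simp at hm
        simp only [List.filterMap_cons, hq]
        rw [PySem.Set.update_cons, PySem.Set.add_eq_ite, if_pos hv]
      · rw [if_neg hm, ih, PySem.Dict.keys_modify, keys_insert_add]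
        simp only [List.filterMap_cons, hq]
        rw [PySem.Set.update_cons]

-- ===== VERDICT (by name: the statement is the Claim_ definition above) =====
theorem get_followed_users_by_name_spec : Claim_equal_get_followed_users_by_name := by
  intro contexts _ _
  show get_followed_users_by_name contexts = get_followed_users_by_name_alt contexts
  have hA : get_followed_users_by_name contexts
      = ((bPairs contexts).foldl aStep PySem.Dict.empty).items := by
    unfold get_followed_users_by_name bPairs
    rw [aFlat]
  have hB : get_followed_users_by_name_alt contexts
      = ((bPairs contexts).foldl bStep PySem.Dict.empty).items.map
          (fun p => (p.1, PySem.List.dedup p.2)) := rfl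
  rw [hA, hB]
  set pairs := bPairs contexts with hp
  have hkA := keys_foldA pairs PySem.Dict.empty
  have hkB := keys_foldB pairs PySem.Dict.empty
  have hkeys : (pairs.foldl aStep PySem.Dict.empty).keys
      = (pairs.foldl bStep PySem.Dict.empty).keys := by rw [hkA, hkB]
  have hnodA : (pairs.foldl aStep PySem.Dict.empty).keys.Nodup := by
    rw [hkA, show (PySem.Dict.empty : PySem.Dict String (List String)).keys = PySem.Set.empty from rfl,
      PySem.Set.update_empty]
    exact PySem.Set.nodup_ofList _
  have hnodB : (pairs.foldl bStep PySem.Dict.empty).keys.Nodup := by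
    rw [hkB, show (PySem.Dict.empty : PySem.Dict String (List String)).keys = PySem.Set.empty from rfl,
      PySem.Set.update_empty]
    exact PySem.Set.nodup_ofList _
  rw [PySem.Dict.items_eq_map_keys _ hnodA ([] : List String),
      PySem.Dict.items_eq_map_keys _ hnodB ([] : List String),
      hkeys, List.map_map]
  refine List.map_congr_left ?_
  intro u _
  simp only [Function.comp]
  rw [getD_foldA, getD_foldB]
  simp [PySem.List.dedup, PySem.Set.ofList, PySem.Set.empty]
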